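-- pv_equiv track=rewrite | github.com/rgbygv/leetcode | python/1997.first-day-where-you-have-been-in-all-the-rooms/solution.py | firstDayBeenInAllRooms
-- ===== SOURCE A (Python) =====
-- from typing import List, Optional
--
-- def firstDayBeenInAllRooms(nextVisit: List[int]) -> int:
--     mod = 10**9 + 7
--     n = len(nextVisit)
--
--     f = [0] * (n + 1)
--     p = [0] * (n + 1)
--     for i, x in enumerate(nextVisit):
--         f[i] = f[i - 1] + 2
--         if x != i:
--             f[i] += p[i] - p[x]  # sum(f[x:i])
--         f[i] %= mod
--         p[i + 1] = f[i]
--     # ic(f)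
--     return f[n - 2]
-- ===== SOURCE B (Python) =====
-- def firstDayBeenInAllRooms(nextVisit):
--     # Backward contribution counting: w[j] = how many times (mod p) the 2-day
--     # round trip out of room j is charged before room n-1 is first reached;
--     # answer = 2 * sum of all w.  One right-to-left pass with a running active
--     # sum `acc` and a difference array `expire` that retires w[i] once the scan
--     # passes below nextVisit[i].
--     mod = 10**9 + 7
--     n = len(nextVisit)
--     expire = [0] * (n + 1)
--     acc = 0
--     total = 0
--     for j in range(n - 2, -1, -1):
--         acc = (acc - expire[j + 1]) % mod
--         w = (1 + acc) % mod
--         total = (total + w) % mod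
--         acc = (acc + w) % mod
--         expire[nextVisit[j]] = (expire[nextVisit[j]] + w) % mod
--     return 2 * total % mod
-- ===== Notes on version B (the rewrite author's own statement) =====
-- stated objective: alternative
-- what changed: B replaces A's forward first-day DP (two parallel tables f and p indexed by day recurrences) by a single backward pass that counts, per room, how often its 2-day round trip is charged (running active sum plus a difference/expiry array) and returns twice the total.
import Mathlib
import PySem

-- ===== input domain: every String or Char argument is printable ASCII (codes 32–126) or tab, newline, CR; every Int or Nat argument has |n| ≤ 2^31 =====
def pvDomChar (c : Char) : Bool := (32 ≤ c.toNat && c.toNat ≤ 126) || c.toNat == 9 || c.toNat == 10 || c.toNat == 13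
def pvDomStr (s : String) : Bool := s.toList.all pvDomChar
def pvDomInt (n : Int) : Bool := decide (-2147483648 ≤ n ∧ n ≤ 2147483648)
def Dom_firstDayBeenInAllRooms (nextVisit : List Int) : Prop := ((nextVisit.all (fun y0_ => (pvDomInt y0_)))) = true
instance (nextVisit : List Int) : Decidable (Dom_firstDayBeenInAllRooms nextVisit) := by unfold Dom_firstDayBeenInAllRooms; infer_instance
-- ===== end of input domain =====

-- B replaces A's forward first-day DP by a backward contribution count (running active
-- sum + expiry difference array), returning twice the total (objective: alternative algorithm).

-- ===== PORT A =====
-- the `for i, x in enumerate(nextVisit)` loop of A, carrying (f, p)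
def pvLoopA (md : Int) : List Int → Nat → List Int → List Int → List Int × List Int
  | [], _, f, p => (f, p)
  | x :: rest, i, f, p =>
    let fi := (PySem.List.pyGetD f ((i : Int) - 1) 0) + 2           -- f[i] = f[i-1] + 2
    let fi := if x ≠ (i : Int) then
        fi + PySem.List.pyGetD p (i : Int) 0 - PySem.List.pyGetD p x 0  -- f[i] += p[i] - p[x]
      else fi
    let fi := PySem.Int.mod fi md                                    -- f[i] %= mod
    pvLoopA md rest (i + 1) (f.set i fi) (p.set (i + 1) fi)          -- p[i+1] = f[i]

def firstDayBeenInAllRooms (nextVisit : List Int) : Int :=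
  let md : Int := 1000000007
  let n := nextVisit.length
  let fp := pvLoopA md nextVisit 0 (List.replicate (n + 1) 0) (List.replicate (n + 1) 0)
  PySem.List.pyGetD fp.1 ((n : Int) - 2) 0                           -- return f[n-2]

-- ===== PORT B =====
-- the `for j in range(n-2, -1, -1)` loop of B; the Nat argument is j+1 (0 = loop done),
-- state (expire, acc, total)
def pvLoopB (md : Int) (nv : List Int) : Nat → List Int × Int × Int → List Int × Int × Int
  | 0, st => st
  | j + 1, (expire, acc, total) =>
    let acc := PySem.Int.mod (acc - PySem.List.pyGetD expire ((j : Int) + 1) 0) md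
    let w := PySem.Int.mod (1 + acc) md
    let total := PySem.Int.mod (total + w) md
    let acc := PySem.Int.mod (acc + w) md
    let x := PySem.List.pyGetD nv (j : Int) 0
    let expire := PySem.List.pySetD expire x (PySem.Int.mod (PySem.List.pyGetD expire x 0 + w) md)
    pvLoopB md nv j (expire, acc, total)

def firstDayBeenInAllRooms_alt (nextVisit : List Int) : Int :=
  let md : Int := 1000000007
  let n := nextVisit.length
  let st := pvLoopB md nextVisit (n - 1) (List.replicate (n + 1) 0, 0, 0)
  PySem.Int.mod (2 * st.2.2) md                                      -- return 2 * total % mod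

-- ===== PRECONDITION & SPEC =====
-- Pre_ is exactly where Python A returns: nonempty (else f[n-2] raises IndexError) and every
-- nextVisit[i] a valid Python index into the length-(n+1) table p (else p[x] raises IndexError).
def Pre_firstDayBeenInAllRooms (nextVisit : List Int) : Prop :=
  nextVisit ≠ [] ∧ ∀ x ∈ nextVisit, -((nextVisit.length : Int) + 1) ≤ x ∧ x ≤ (nextVisit.length : Int)
instance (nextVisit : List Int) : Decidable (Pre_firstDayBeenInAllRooms nextVisit) := by unfold Pre_firstDayBeenInAllRooms; infer_instance
def pvWitness_firstDayBeenInAllRooms : List Int := [0, 0, 1]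

def Spec_firstDayBeenInAllRooms (nextVisit : List Int) (out : Int) : Prop := out = firstDayBeenInAllRooms_alt nextVisit
instance (nextVisit : List Int) (out : Int) : Decidable (Spec_firstDayBeenInAllRooms nextVisit out) := by unfold Spec_firstDayBeenInAllRooms; infer_instance

-- ===== CLAIM (what is proved, stated in full; the proofs are below) =====
def Claim_equal_firstDayBeenInAllRooms : Prop := ∀ (nextVisit : List Int), Dom_firstDayBeenInAllRooms nextVisit → Pre_firstDayBeenInAllRooms nextVisit → Spec_firstDayBeenInAllRooms nextVisit (firstDayBeenInAllRooms nextVisit)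

-- ===== LEMMAS AND PROOFS =====

-- the effective jump target of step i: resolve Python's negative wrap into the length-(n+1)
-- tables, then clamp forward/after-the-fact targets (which both programs treat as 0)
def pvSlot (nv : List Int) (i : Nat) : Int :=
  if nv.getD i 0 < 0 then (nv.length : Int) + 1 + nv.getD i 0 else nv.getD i 0

def pvEff (nv : List Int) (i : Nat) : Nat :=
  if 0 ≤ pvSlot nv i ∧ pvSlot nv i ≤ (i : Int) then (pvSlot nv i).toNat else 0

theorem pvEff_le (nv : List Int) (i : Nat) : pvEff nv i ≤ i := by
  unfold pvEff
  split
  · next h => exact Int.toNat_le.mpr h.2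
  · exact Nat.zero_le i

-- the exact (un-reduced) first-day sequence: dpE (i+1) = 2·dpE i − dpE (eff i) + 2
def pvDpE (eff : Nat → Nat) : Nat → Int
  | 0 => 0
  | i + 1 => 2 * pvDpE eff i - pvDpE eff (min (eff i) i) + 2
termination_by i => i
decreasing_by all_goals omega

-- the same sequence reduced step-wise, exactly as both Pythons store it
def pvDpM (md : Int) (eff : Nat → Nat) : Nat → Int
  | 0 => 0
  | i + 1 => PySem.Int.mod (pvDpM md eff i + 2 + pvDpM md eff i - pvDpM md eff (min (eff i) i)) md
termination_by i => i
decreasing_by all_goals omega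

-- B's coefficient: how often the 2-day hop out of room j is charged (downward recursion)
def pvW (m : Nat) (eff : Nat → Nat) (j : Nat) : Int :=
  1 + ∑ i ∈ (Finset.Ico (j + 1) m).attach, if eff i.1 ≤ j then pvW m eff i.1 else 0
termination_by m - j
decreasing_by have := (Finset.mem_Ico.mp i.2); omega

theorem pvW_eq (m : Nat) (eff : Nat → Nat) (j : Nat) :
    pvW m eff j = 1 + ∑ i ∈ Finset.Ico (j + 1) m, if eff i ≤ j then pvW m eff i else 0 := by
  rw [pvW, Finset.sum_attach (Finset.Ico (j + 1) m) (fun i => if eff i ≤ j then pvW m eff i else 0)]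

-- step-wise reduction equals final reduction
theorem pvDpM_eq (eff : Nat → Nat) (i : Nat) :
    pvDpM 1000000007 eff i = pvDpE eff i % 1000000007 := by
  induction i using Nat.strong_induction_on with
  | _ i ih =>
    match i with
    | 0 => simp [pvDpM, pvDpE]
    | i + 1 =>
      rw [pvDpM, pvDpE, PySem.Int.mod_eq_emod_of_pos (by norm_num),
        ih i (by omega), ih (min (eff i) i) (by omega)]
      omega

-- the central identity: the forward first-day value is twice the sum of the backward coefficients
theorem pvKey (m : Nat) (eff : Nat → Nat) (heff : ∀ i, eff i ≤ i) :
    pvDpE eff m = 2 * ∑ j ∈ Finset.range m, pvW m eff j := by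
  set W := pvW m eff with hW
  set g : Nat → Int := fun j => pvDpE eff (j + 1) - pvDpE eff j with hgdef
  have hg : ∀ j, g j = 2 + (pvDpE eff j - pvDpE eff (eff j)) := by
    intro j
    simp only [hgdef, pvDpE, min_eq_left (heff j)]
    ring
  have tele : ∀ a b : Nat, a ≤ b →
      ∑ t ∈ Finset.Ico a b, g t = pvDpE eff b - pvDpE eff a := by
    intro a b hab
    induction b, hab using Nat.le_induction with
    | base => simp
    | succ b hab ih =>
      rw [Finset.sum_Ico_succ_top hab, ih]
      simp only [hgdef]
      ring
  have hdpm : pvDpE eff m = ∑ t ∈ Finset.range m, g t := by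
    rw [Finset.range_eq_Ico, tele 0 m (Nat.zero_le m)]
    simp [pvDpE]
  have exch : ∑ j ∈ Finset.range m, ∑ t ∈ Finset.Ico (eff j) j, (W j * g t)
      = ∑ t ∈ Finset.range m, (W t - 1) * g t := by
    have h1 : ∀ j ∈ Finset.range m, ∑ t ∈ Finset.Ico (eff j) j, (W j * g t)
        = ∑ t ∈ Finset.range m, if t ∈ Finset.Ico (eff j) j then W j * g t else 0 := by
      intro j hj
      rw [Finset.sum_ite_mem, Finset.inter_eq_right.mpr]
      intro t ht
      have h1 := Finset.mem_Ico.mp ht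
      have h2 := Finset.mem_range.mp hj
      exact Finset.mem_range.mpr (by omega)
    rw [Finset.sum_congr rfl h1, Finset.sum_comm]
    apply Finset.sum_congr rfl
    intro t ht
    have h2 : ∀ j ∈ Finset.range m, (if t ∈ Finset.Ico (eff j) j then W j * g t else 0)
        = (if j ∈ Finset.Ico (t + 1) m then (if eff j ≤ t then W j else 0) else 0) * g t := by
      intro j hj
      have hjm := Finset.mem_range.mp hj
      simp only [Finset.mem_Ico]
      by_cases hc : eff j ≤ t ∧ t < j
      · rw [if_pos hc, if_pos ⟨by omega, hjm⟩, if_pos hc.1]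
      · rw [if_neg hc]
        by_cases hd : t + 1 ≤ j ∧ j < m
        · rw [if_pos hd, if_neg (show ¬ eff j ≤ t by omega), zero_mul]
        · rw [if_neg hd, zero_mul]
    rw [Finset.sum_congr rfl h2, ← Finset.sum_mul]
    congr 1
    rw [Finset.sum_ite_mem, Finset.inter_eq_right.mpr
      (by intro j hj; exact Finset.mem_range.mpr (Finset.mem_Ico.mp hj).2)]
    rw [hW, pvW_eq]
    ring
  have main : ∑ j ∈ Finset.range m, W j * g j
      - ∑ j ∈ Finset.range m, ∑ t ∈ Finset.Ico (eff j) j, (W j * g t)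
      = ∑ j ∈ Finset.range m, W j * 2 := by
    rw [← Finset.sum_sub_distrib]
    apply Finset.sum_congr rfl
    intro j _
    rw [← Finset.mul_sum, tele (eff j) j (heff j), hg j]
    ring
  rw [exch] at main
  have hfin : ∑ t ∈ Finset.range m, g t = ∑ j ∈ Finset.range m, W j * 2 := by
    rw [← main, ← Finset.sum_sub_distrib]
    apply Finset.sum_congr rfl
    intro t _
    ring
  rw [hdpm, hfin, ← Finset.sum_mul]
  ring

-- ---- small indexing helpers ----

theorem pvGetD_set (l : List Int) (i k : Nat) (v : Int) (hi : i < l.length) (hk : k < l.length) :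
    (l.set i v).getD k 0 = if i = k then v else l.getD k 0 := by
  rw [List.getD_eq_getElem l 0 hk, List.getD_eq_getElem (l.set i v) 0 (by simpa using hk),
    List.getElem_set]

theorem pvGetD_replicate (n k : Nat) : (List.replicate n (0 : Int)).getD k 0 = 0 := by
  simp [List.getD]

-- Python read l[x] for a possibly negative in-range index, as a plain getD
theorem pvGetD_wrap (l : List Int) (x : Int) (h1 : -(l.length : Int) ≤ x) (h2 : x < (l.length : Int)) :
    PySem.List.pyGetD l x 0 = l.getD (if x < 0 then ((l.length : Int) + x).toNat else x.toNat) 0 := by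
  by_cases hx : x < 0
  · have hk1 : 0 < (-x).toNat := by omega
    have hk2 : (-x).toNat ≤ l.length := by omega
    have hx' : x = -(((-x).toNat : Nat) : Int) := by omega
    rw [hx', PySem.List.pyGetD_neg_natCast l (-x).toNat 0 hk1 hk2, if_pos (by omega),
      List.getD_eq_getElem l 0 (show ((l.length : Int) + -(((-x).toNat : Nat) : Int)).toNat < l.length by omega)]
    congr 1
    omega
  · rw [show x = ((x.toNat : Nat) : Int) by omega, PySem.List.pyGetD_natCast l x.toNat 0,
      if_neg (by omega)]
    rw [show (((x.toNat : Nat) : Int)).toNat = x.toNat by omega]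

-- Python write l[x] = v for a possibly negative in-range index, as a plain set
theorem pvSetD_neg (xs : List Int) (k : Nat) (v : Int) (h1 : 0 < k) (h2 : k ≤ xs.length) :
    PySem.List.pySetD xs (-(k : Int)) v = xs.set (xs.length - k) v := by
  simp [PySem.List.pySetD, PySem.List.pySet?, PySem.List.pyIdx?]
  split
  · omega
  · rfl

theorem pvSetD_wrap (l : List Int) (x v : Int) (h1 : -(l.length : Int) ≤ x) (h2 : x < (l.length : Int)) :
    PySem.List.pySetD l x v = l.set (if x < 0 then ((l.length : Int) + x).toNat else x.toNat) v := by
  by_cases hx : x < 0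
  · have hx' : x = -(((-x).toNat : Nat) : Int) := by omega
    rw [hx', pvSetD_neg l (-x).toNat v (by omega) (by omega), if_pos (by omega)]
    congr 1
    omega
  · rw [show x = ((x.toNat : Nat) : Int) by omega, PySem.List.pySetD_natCast, if_neg (by omega)]
    rw [show (((x.toNat : Nat) : Int)).toNat = x.toNat by omega]

theorem pvSlot_bounds (nv : List Int)
    (hb : ∀ x ∈ nv, -((nv.length : Int) + 1) ≤ x ∧ x ≤ (nv.length : Int))
    (i : Nat) (hi : i < nv.length) :
    0 ≤ pvSlot nv i ∧ pvSlot nv i ≤ (nv.length : Int) := by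
  have hmem : nv.getD i 0 ∈ nv := by
    rw [List.getD_eq_getElem nv 0 hi]
    exact List.getElem_mem hi
  have := hb _ hmem
  unfold pvSlot
  split <;> omega

-- dpM at 0 is 0
theorem pvDpM_zero (eff : Nat → Nat) : pvDpM 1000000007 eff 0 = 0 := by simp [pvDpM]

-- the per-step value both programs store: reading A's tables under the invariant yields dpM (i+1)
-- (proved inline in pvLoopA_inv)

-- ---- A-loop invariant ----
theorem pvLoopA_inv (nv : List Int)
    (hb : ∀ x ∈ nv, -((nv.length : Int) + 1) ≤ x ∧ x ≤ (nv.length : Int)) :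
    ∀ (rest : List Int) (i : Nat) (f p : List Int),
      rest = nv.drop i → i ≤ nv.length →
      f.length = nv.length + 1 → p.length = nv.length + 1 →
      (∀ k, k < nv.length + 1 →
        f.getD k 0 = if k < i then pvDpM 1000000007 (pvEff nv) (k + 1) else 0) →
      (∀ k, k < nv.length + 1 →
        p.getD k 0 = if k ≤ i then pvDpM 1000000007 (pvEff nv) k else 0) →
      (pvLoopA 1000000007 rest i f p).1.length = nv.length + 1 ∧
      ∀ k, k < nv.length + 1 →
        (pvLoopA 1000000007 rest i f p).1.getD k 0
          = if k < nv.length then pvDpM 1000000007 (pvEff nv) (k + 1) else 0 := by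
  intro rest
  induction rest with
  | nil =>
    intro i f p hdrop hi hlf hlp hF hP
    have hin : nv.length = i := by
      have := congrArg List.length hdrop
      simp at this
      omega
    rw [show pvLoopA 1000000007 [] i f p = (f, p) from rfl]
    constructor
    · exact hlf
    · intro k hk
      rw [hF k hk, hin]
  | cons x rest ih =>
    intro i f p hdrop hi hlf hlp hF hP
    have hlt : i < nv.length := by
      by_contra h
      rw [List.drop_eq_nil_of_le (by omega)] at hdrop
      exact List.cons_ne_nil x rest hdrop
    have hxi : x = nv.getD i 0 := by
      rw [List.getD_eq_getElem nv 0 hlt]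
      have := List.drop_eq_getElem_cons hlt
      rw [this] at hdrop
      exact (List.cons.injEq _ _ _ _ ▸ hdrop).1
    have hrest : rest = nv.drop (i + 1) := by
      rw [List.drop_eq_getElem_cons hlt] at hdrop
      exact (List.cons.injEq _ _ _ _ ▸ hdrop).2
    -- the three reads
    have hr1 : PySem.List.pyGetD f ((i : Int) - 1) 0 = pvDpM 1000000007 (pvEff nv) i := by
      match i with
      | 0 =>
        rw [show ((0 : Nat) : Int) - 1 = -(((1 : Nat) : Nat) : Int) by norm_num]
        rw [PySem.List.pyGetD_neg_natCast f 1 0 (by omega) (by omega)]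
        rw [← List.getD_eq_getElem f 0 (show f.length - 1 < f.length by omega)]
        rw [hF (f.length - 1) (by omega)]
        rw [if_neg (by omega), pvDpM_zero]
      | i + 1 =>
        rw [show ((i + 1 : Nat) : Int) - 1 = ((i : Nat) : Int) by omega]
        rw [PySem.List.pyGetD_natCast f i 0, hF i (by omega), if_pos (by omega)]
    have hr2 : PySem.List.pyGetD p ((i : Int)) 0 = pvDpM 1000000007 (pvEff nv) i := by
      rw [PySem.List.pyGetD_natCast p i 0, hP i (by omega), if_pos (by omega)]
    have hsb := pvSlot_bounds nv hb i hlt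
    have hr3 : PySem.List.pyGetD p x 0 = pvDpM 1000000007 (pvEff nv) (pvEff nv i) := by
      rw [hxi, pvGetD_wrap p (nv.getD i 0) (by rw [hlp]; push_cast; unfold pvSlot at hsb; split at hsb <;> omega)
        (by rw [hlp]; push_cast; unfold pvSlot at hsb; split at hsb <;> omega)]
      have hslot : (if nv.getD i 0 < 0 then ((p.length : Int) + nv.getD i 0).toNat
          else (nv.getD i 0).toNat) = (pvSlot nv i).toNat := by
        rw [hlp]
        unfold pvSlot
        split <;> (push_cast; omega)
      rw [hslot]
      rw [hP (pvSlot nv i).toNat (by omega)]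
      unfold pvEff
      by_cases hc : 0 ≤ pvSlot nv i ∧ pvSlot nv i ≤ (i : Int)
      · rw [if_pos hc, if_pos (by omega)]
      · rw [if_neg hc, if_neg (by omega), pvDpM_zero]
    -- the stored value is dpM (i+1)
    have hval : PySem.Int.mod
        ((if x ≠ (i : Int) then
            (PySem.List.pyGetD f ((i : Int) - 1) 0 + 2) + PySem.List.pyGetD p ((i : Int)) 0
              - PySem.List.pyGetD p x 0
          else PySem.List.pyGetD f ((i : Int) - 1) 0 + 2)) 1000000007
        = pvDpM 1000000007 (pvEff nv) (i + 1) := by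
      rw [pvDpM, min_eq_left (pvEff_le nv i)]
      by_cases hxeq : x = (i : Int)
      · rw [if_neg (by simpa using hxeq), hr1]
        have heffi : pvEff nv i = i := by
          have hx0 : nv.getD i 0 = (i : Int) := by rw [← hxi, hxeq]
          unfold pvEff pvSlot
          rw [hx0, if_neg (show ¬ ((i : Int) < 0) by omega),
            if_pos (show (0 : Int) ≤ (i : Int) ∧ (i : Int) ≤ (i : Int) from ⟨by omega, le_refl _⟩)]
          omega
        rw [heffi]
        try congr 1
        try ring
      · rw [if_pos hxeq, hr1, hr2, hr3]
        try congr 1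
        try ring
    rw [show pvLoopA 1000000007 (x :: rest) i f p
        = pvLoopA 1000000007 rest (i + 1)
            (f.set i (PySem.Int.mod
              ((if x ≠ (i : Int) then
                  (PySem.List.pyGetD f ((i : Int) - 1) 0 + 2) + PySem.List.pyGetD p ((i : Int)) 0
                    - PySem.List.pyGetD p x 0
                else PySem.List.pyGetD f ((i : Int) - 1) 0 + 2)) 1000000007))
            (p.set (i + 1) (PySem.Int.mod
              ((if x ≠ (i : Int) then
                  (PySem.List.pyGetD f ((i : Int) - 1) 0 + 2) + PySem.List.pyGetD p ((i : Int)) 0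
                    - PySem.List.pyGetD p x 0
                else PySem.List.pyGetD f ((i : Int) - 1) 0 + 2)) 1000000007))
        from rfl]
    rw [hval]
    apply ih (i + 1) _ _ hrest (by omega) (by simpa using hlf) (by simpa using hlp)
    · intro k hk
      rw [pvGetD_set f i k _ (by omega) (by omega)]
      by_cases hki : i = k
      · subst hki
        rw [if_pos rfl, if_pos (by omega)]
      · rw [if_neg hki, hF k hk]
        by_cases h2 : k < i
        · rw [if_pos h2, if_pos (by omega)]
        · rw [if_neg h2, if_neg (by omega)]
    · intro k hk
      rw [pvGetD_set p (i + 1) k _ (by omega) (by omega)]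
      by_cases hki : i + 1 = k
      · subst hki
        rw [if_pos rfl, if_pos (by omega)]
      · rw [if_neg hki, hP k hk]
        by_cases h2 : k ≤ i
        · rw [if_pos h2, if_pos (by omega)]
        · rw [if_neg h2, if_neg (by omega)]

-- ---- B-loop invariant ----
theorem pvLoopB_inv (nv : List Int) (m : Nat) (hm : nv.length = m + 1)
    (hb : ∀ x ∈ nv, -((nv.length : Int) + 1) ≤ x ∧ x ≤ (nv.length : Int)) :
    ∀ (c : Nat) (expire : List Int) (acc total : Int),
      c ≤ m →
      expire.length = nv.length + 1 →
      total = (∑ i ∈ Finset.Ico c m, pvW m (pvEff nv) i) % 1000000007 →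
      acc = (∑ i ∈ (Finset.Ico c m).filter (fun i => pvEff nv i ≤ c), pvW m (pvEff nv) i) % 1000000007 →
      (∀ k, 1 ≤ k → k ≤ c → expire.getD k 0
          = (∑ i ∈ (Finset.Ico c m).filter (fun i => pvEff nv i = k), pvW m (pvEff nv) i) % 1000000007) →
      (pvLoopB 1000000007 nv c (expire, acc, total)).2.2
        = (∑ i ∈ Finset.range m, pvW m (pvEff nv) i) % 1000000007 := by
  intro c
  induction c with
  | zero =>
    intro expire acc total _ _ htot _ _
    rw [show pvLoopB 1000000007 nv 0 (expire, acc, total) = (expire, acc, total) from rfl]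
    rw [htot, Finset.range_eq_Ico]
  | succ c ihc =>
    intro expire acc total hc hlen htot hacc hexp
    have hcm : c < m := by omega
    have hread1 : PySem.List.pyGetD expire ((c : Int) + 1) 0 = expire.getD (c + 1) 0 := by
      rw [show ((c : Int) + 1) = (((c + 1 : Nat) : Nat) : Int) by push_cast; ring,
        PySem.List.pyGetD_natCast]
    -- acc after the expiry subtraction
    have hacc1 : PySem.Int.mod (acc - PySem.List.pyGetD expire ((c : Int) + 1) 0) 1000000007
        = (∑ i ∈ (Finset.Ico (c + 1) m).filter (fun i => pvEff nv i ≤ c), pvW m (pvEff nv) i)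
            % 1000000007 := by
      rw [hread1, hexp (c + 1) (by omega) (le_refl _), hacc,
        PySem.Int.mod_eq_emod_of_pos (by norm_num)]
      have hsplit : ∑ i ∈ (Finset.Ico (c + 1) m).filter (fun i => pvEff nv i ≤ c + 1), pvW m (pvEff nv) i
          = ∑ i ∈ (Finset.Ico (c + 1) m).filter (fun i => pvEff nv i ≤ c), pvW m (pvEff nv) i
            + ∑ i ∈ (Finset.Ico (c + 1) m).filter (fun i => pvEff nv i = c + 1), pvW m (pvEff nv) i := by
        rw [Finset.sum_filter, Finset.sum_filter, Finset.sum_filter, ← Finset.sum_add_distrib]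
        apply Finset.sum_congr rfl
        intro i _
        by_cases h1 : pvEff nv i ≤ c
        · rw [if_pos (by omega), if_pos h1, if_neg (by omega), add_zero]
        · by_cases h2 : pvEff nv i = c + 1
          · rw [if_pos (by omega), if_neg h1, if_pos h2, zero_add]
          · rw [if_neg (by omega), if_neg h1, if_neg h2, add_zero]
      rw [hsplit]
      omega
    -- the value written for this step is W c (reduced)
    have hw : PySem.Int.mod
        (1 + ((∑ i ∈ (Finset.Ico (c + 1) m).filter (fun i => pvEff nv i ≤ c), pvW m (pvEff nv) i)
            % 1000000007)) 1000000007
        = pvW m (pvEff nv) c % 1000000007 := by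
      rw [PySem.Int.mod_eq_emod_of_pos (by norm_num), pvW_eq m (pvEff nv) c, ← Finset.sum_filter]
      omega
    have hx : PySem.List.pyGetD nv ((c : Int)) 0 = nv.getD c 0 := PySem.List.pyGetD_natCast nv c 0
    have hsb := pvSlot_bounds nv hb c (by omega)
    have hslot : (if nv.getD c 0 < 0 then ((expire.length : Int) + nv.getD c 0).toNat
        else (nv.getD c 0).toNat) = (pvSlot nv c).toNat := by
      rw [hlen]
      unfold pvSlot
      split <;> (push_cast; omega)
    have hwrapget : PySem.List.pyGetD expire (nv.getD c 0) 0 = expire.getD (pvSlot nv c).toNat 0 := by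
      rw [pvGetD_wrap expire (nv.getD c 0)
        (by rw [hlen]; push_cast; unfold pvSlot at hsb; split at hsb <;> omega)
        (by rw [hlen]; push_cast; unfold pvSlot at hsb; split at hsb <;> omega), hslot]
    have hwrapset : ∀ v, PySem.List.pySetD expire (nv.getD c 0) v = expire.set (pvSlot nv c).toNat v := by
      intro v
      rw [pvSetD_wrap expire (nv.getD c 0) v
        (by rw [hlen]; push_cast; unfold pvSlot at hsb; split at hsb <;> omega)
        (by rw [hlen]; push_cast; unfold pvSlot at hsb; split at hsb <;> omega), hslot]
    rw [show pvLoopB 1000000007 nv (c + 1) (expire, acc, total)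
        = pvLoopB 1000000007 nv c
            (PySem.List.pySetD expire (PySem.List.pyGetD nv ((c : Int)) 0)
              (PySem.Int.mod
                (PySem.List.pyGetD expire (PySem.List.pyGetD nv ((c : Int)) 0) 0
                  + PySem.Int.mod (1 + PySem.Int.mod (acc - PySem.List.pyGetD expire ((c : Int) + 1) 0) 1000000007) 1000000007) 1000000007),
             PySem.Int.mod
               (PySem.Int.mod (acc - PySem.List.pyGetD expire ((c : Int) + 1) 0) 1000000007
                 + PySem.Int.mod (1 + PySem.Int.mod (acc - PySem.List.pyGetD expire ((c : Int) + 1) 0) 1000000007) 1000000007) 1000000007,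
             PySem.Int.mod
               (total + PySem.Int.mod (1 + PySem.Int.mod (acc - PySem.List.pyGetD expire ((c : Int) + 1) 0) 1000000007) 1000000007) 1000000007)
        from rfl]
    apply ihc
    · omega
    · rw [hx, hwrapset]
      simpa using hlen
    · -- total invariant at level c
      rw [hacc1, hw, htot, PySem.Int.mod_eq_emod_of_pos (by norm_num),
        Finset.sum_eq_sum_Ico_succ_bot hcm (fun i => pvW m (pvEff nv) i)]
      omega
    · -- acc invariant at level c
      rw [hacc1, hw, PySem.Int.mod_eq_emod_of_pos (by norm_num)]
      have hstep : ∑ i ∈ (Finset.Ico c m).filter (fun i => pvEff nv i ≤ c), pvW m (pvEff nv) i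
          = pvW m (pvEff nv) c
            + ∑ i ∈ (Finset.Ico (c + 1) m).filter (fun i => pvEff nv i ≤ c), pvW m (pvEff nv) i := by
        rw [Finset.sum_filter, Finset.sum_filter,
          Finset.sum_eq_sum_Ico_succ_bot hcm (fun i => if pvEff nv i ≤ c then pvW m (pvEff nv) i else 0),
          if_pos (pvEff_le nv c)]
      rw [hstep]
      omega
    · -- expiry invariant at level c
      intro k hk1 hkc
      rw [hx, hwrapset, hwrapget, hacc1, hw,
        pvGetD_set expire (pvSlot nv c).toNat k _ (by omega) (by omega)]
      by_cases hks : (pvSlot nv c).toNat = k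
      · have heffc : pvEff nv c = k := by
          unfold pvEff
          rw [if_pos ⟨hsb.1, by omega⟩]
          exact hks
        rw [if_pos hks, ← hks, hks, hexp k (by omega) (by omega),
          PySem.Int.mod_eq_emod_of_pos (by norm_num)]
        have hstep : ∑ i ∈ (Finset.Ico c m).filter (fun i => pvEff nv i = k), pvW m (pvEff nv) i
            = pvW m (pvEff nv) c
              + ∑ i ∈ (Finset.Ico (c + 1) m).filter (fun i => pvEff nv i = k), pvW m (pvEff nv) i := by
          rw [Finset.sum_filter, Finset.sum_filter,
            Finset.sum_eq_sum_Ico_succ_bot hcm (fun i => if pvEff nv i = k then pvW m (pvEff nv) i else 0),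
            if_pos heffc]
        rw [hstep]
        omega
      · have heffc : pvEff nv c ≠ k := by
          unfold pvEff
          split
          · exact hks
          · omega
        rw [if_neg hks, hexp k (by omega) (by omega)]
        have hstep : ∑ i ∈ (Finset.Ico c m).filter (fun i => pvEff nv i = k), pvW m (pvEff nv) i
            = ∑ i ∈ (Finset.Ico (c + 1) m).filter (fun i => pvEff nv i = k), pvW m (pvEff nv) i := by
          rw [Finset.sum_filter, Finset.sum_filter,
            Finset.sum_eq_sum_Ico_succ_bot hcm (fun i => if pvEff nv i = k then pvW m (pvEff nv) i else 0),
            if_neg heffc, zero_add]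
        rw [hstep]

-- ---- verdict ----
theorem firstDayBeenInAllRooms_spec : Claim_equal_firstDayBeenInAllRooms := by
  intro nv _ hpre
  obtain ⟨hne, hb⟩ := hpre
  unfold Spec_firstDayBeenInAllRooms
  simp only [firstDayBeenInAllRooms, firstDayBeenInAllRooms_alt]
  have hn1 : 1 ≤ nv.length := by
    cases nv with
    | nil => exact absurd rfl hne
    | cons a b => simp
  set m := nv.length - 1 with hmdef
  have hm : nv.length = m + 1 := by omega
  obtain ⟨hAlen, hAinv⟩ := pvLoopA_inv nv hb nv 0
      (List.replicate (nv.length + 1) 0) (List.replicate (nv.length + 1) 0)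
      (by simp) (by omega) (by simp) (by simp)
      (fun k hk => by rw [pvGetD_replicate, if_neg (by omega)])
      (fun k hk => by
        rw [pvGetD_replicate]
        by_cases h0 : k = 0
        · subst h0
          rw [if_pos (le_refl 0), pvDpM_zero]
        · rw [if_neg (by omega)])
  have hBtot := pvLoopB_inv nv m hm hb m (List.replicate (nv.length + 1) 0) 0 0 (le_refl m)
      (by simp)
      (by rw [Finset.Ico_self, Finset.sum_empty]; norm_num)
      (by rw [Finset.Ico_self]; simp)
      (fun k h1 hk => by rw [pvGetD_replicate, Finset.Ico_self]; simp)
  rw [hBtot, PySem.Int.mod_eq_emod_of_pos (by norm_num)]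
  by_cases h2 : 2 ≤ nv.length
  · rw [show ((nv.length : Int) - 2) = (((nv.length - 2 : Nat) : Nat) : Int) by omega,
      PySem.List.pyGetD_natCast, hAinv (nv.length - 2) (by omega), if_pos (by omega),
      show nv.length - 2 + 1 = m by omega, pvDpM_eq, pvKey m (pvEff nv) (pvEff_le nv)]
    omega
  · have hlen1 : nv.length = 1 := by omega
    have hm0 : m = 0 := by omega
    rw [show ((nv.length : Int) - 2) = -(((1 : Nat) : Nat) : Int) by omega,
      PySem.List.pyGetD_neg_natCast _ 1 0 (by omega) (by omega),
      ← List.getD_eq_getElem _ 0 (by omega),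
      show (pvLoopA 1000000007 nv 0 (List.replicate (nv.length + 1) 0)
          (List.replicate (nv.length + 1) 0)).1.length - 1 = nv.length by omega,
      hAinv nv.length (by omega), if_neg (by omega), hm0]
    norm_num
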